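-- pv_equiv track=rewrite | github.com/ana-gGarcia/anakarlagarcia | mpp.py | esta
-- ===== SOURCE A (Python) =====
-- Base = [
-- 		["Laura","Queretaro"],
-- 		["Alena","Paris"],
-- 		["Claudia","SFrancisco"],
-- 		["Queretaro","Mexico"],
-- 		["Paris","Francia"],
-- 		["SFrancisco","EUA"],
-- 		["Mexico","America"],
-- 		["Francia","Europa"],
-- 		["EUA","America"]
-- ]
--
-- def esta(E1,E2):
--
--
-- 	if not E1:
-- 		return False
--
-- 	if not E2:
-- 		return False
--
-- 	B=[ e for e in Base if e[0]==E1 ]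
--
-- 	if not B:
-- 		return False
--
--
-- 	A=B[0][1]
-- 	E,A=B[0]
--
-- 	if E2== A:
--
-- 		return True
-- 	return esta(A,E2)
-- ===== SOURCE B (Python) =====
-- Base = [
--         ["Laura","Queretaro"],
--         ["Alena","Paris"],
--         ["Claudia","SFrancisco"],
--         ["Queretaro","Mexico"],
--         ["Paris","Francia"],
--         ["SFrancisco","EUA"],
--         ["Mexico","America"],
--         ["Francia","Europa"],
--         ["EUA","America"]
-- ]
--
-- _SUCC = {a: b for a, b in Base}
--
-- def esta(E1, E2):
--     if not E2:
--         return False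
--     current = E1
--     for _ in range(len(Base)):
--         if not current:
--             return False
--         if current not in _SUCC:
--             return False
--         nxt = _SUCC[current]
--         if nxt == E2:
--             return True
--         current = nxt
--     return False
-- ===== Notes on version B (the rewrite author's own statement) =====
-- stated objective: alternative
-- what changed: Replaced A's recursion that re-filters the Base list at every step with a successor dict built once and an iterative bounded loop that threads the chain through a mutable 'current'.
import Mathlib
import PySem

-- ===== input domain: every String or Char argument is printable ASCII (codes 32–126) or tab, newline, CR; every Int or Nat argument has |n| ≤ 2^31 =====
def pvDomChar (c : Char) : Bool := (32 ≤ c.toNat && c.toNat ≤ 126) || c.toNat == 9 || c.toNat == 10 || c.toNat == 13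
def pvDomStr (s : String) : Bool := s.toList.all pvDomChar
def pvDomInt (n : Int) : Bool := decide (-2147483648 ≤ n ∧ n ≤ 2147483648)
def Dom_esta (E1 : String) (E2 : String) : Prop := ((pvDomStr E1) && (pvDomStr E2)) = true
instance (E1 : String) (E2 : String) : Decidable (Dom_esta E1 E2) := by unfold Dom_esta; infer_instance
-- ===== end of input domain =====

-- B replaces A's recursion (filter scan per step) by a dict built once and an
-- iterative bounded loop over that lookup table (objective: alternative decomposition).

-- ===== PORT A =====
def pvBase : List (String × String) :=
  [("Laura","Queretaro"), ("Alena","Paris"), ("Claudia","SFrancisco"),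
   ("Queretaro","Mexico"), ("Paris","Francia"), ("SFrancisco","EUA"),
   ("Mexico","America"), ("Francia","Europa"), ("EUA","America")]

-- measure used only for termination of the port of A (the fixed Base is acyclic)
def pvRank (s : String) : Nat :=
  if s = "Laura" ∨ s = "Alena" ∨ s = "Claudia" then 3
  else if s = "Queretaro" ∨ s = "Paris" ∨ s = "SFrancisco" then 2
  else if s = "Mexico" ∨ s = "Francia" ∨ s = "EUA" then 1
  else 0

def esta (E1 : String) (E2 : String) : Bool :=
  if E1 = "" then false
  else if E2 = "" then false
  else
    match _h : pvBase.filter (fun e => e.1 == E1) with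
    | [] => false
    | (E, A) :: _ =>
      if E2 == A then true else esta A E2
termination_by pvRank E1
decreasing_by
  have hmem : (E, A) ∈ pvBase.filter (fun e => e.1 == E1) := by
    rw [_h]; exact List.mem_cons_self
  obtain ⟨hb, he⟩ := List.mem_filter.mp hmem
  have hE1 : E = E1 := beq_iff_eq.mp he
  subst hE1
  simp only [pvBase, List.mem_cons, List.not_mem_nil, or_false, Prod.mk.injEq] at hb
  rcases hb with ⟨rfl, rfl⟩|⟨rfl, rfl⟩|⟨rfl, rfl⟩|⟨rfl, rfl⟩|⟨rfl, rfl⟩|⟨rfl, rfl⟩|⟨rfl, rfl⟩|⟨rfl, rfl⟩|⟨rfl, rfl⟩ <;> decide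

-- ===== PORT B =====
def pvSucc : PySem.Dict String String := PySem.Dict.ofList pvBase

def estaLoop (E2 : String) : Nat → String → Bool
  | 0, _ => false
  | n + 1, current =>
    if current = "" then false
    else
      match pvSucc.get? current with
      | none => false
      | some nxt => if nxt == E2 then true else estaLoop E2 n nxt

def esta_alt (E1 : String) (E2 : String) : Bool :=
  if E2 = "" then false else estaLoop E2 pvBase.length E1

-- ===== PRECONDITION & SPEC =====
def Spec_esta (E1 : String) (E2 : String) (out : Bool) : Prop := out = esta_alt E1 E2
instance (E1 : String) (E2 : String) (out : Bool) : Decidable (Spec_esta E1 E2 out) := by unfold Spec_esta; infer_instance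

-- ===== CLAIM (what is proved, stated in full; the proofs are below) =====
def Claim_equal_esta : Prop := ∀ (E1 : String) (E2 : String), Dom_esta E1 E2 → Spec_esta E1 E2 (esta E1 E2)

-- ===== LEMMAS AND PROOFS =====

lemma pvRank_lt_nine (s : String) : pvRank s < 9 := by
  unfold pvRank; split_ifs <;> omega

-- one step of the chain: A's filter and B's dict lookup agree, and the lookup decreases pvRank
lemma pvStep (E1 : String) :
    (pvBase.filter (fun e => e.1 == E1) = [] ∧ pvSucc.get? E1 = none) ∨
    (∃ v, pvBase.filter (fun e => e.1 == E1) = [(E1, v)] ∧ pvSucc.get? E1 = some v ∧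
      pvRank v < pvRank E1) := by
  rcases eq_or_ne E1 "Laura" with rfl|n1
  · exact Or.inr ⟨"Queretaro", by decide, by decide, by decide⟩
  rcases eq_or_ne E1 "Alena" with rfl|n2
  · exact Or.inr ⟨"Paris", by decide, by decide, by decide⟩
  rcases eq_or_ne E1 "Claudia" with rfl|n3
  · exact Or.inr ⟨"SFrancisco", by decide, by decide, by decide⟩
  rcases eq_or_ne E1 "Queretaro" with rfl|n4
  · exact Or.inr ⟨"Mexico", by decide, by decide, by decide⟩
  rcases eq_or_ne E1 "Paris" with rfl|n5
  · exact Or.inr ⟨"Francia", by decide, by decide, by decide⟩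
  rcases eq_or_ne E1 "SFrancisco" with rfl|n6
  · exact Or.inr ⟨"EUA", by decide, by decide, by decide⟩
  rcases eq_or_ne E1 "Mexico" with rfl|n7
  · exact Or.inr ⟨"America", by decide, by decide, by decide⟩
  rcases eq_or_ne E1 "Francia" with rfl|n8
  · exact Or.inr ⟨"Europa", by decide, by decide, by decide⟩
  rcases eq_or_ne E1 "EUA" with rfl|n9
  · exact Or.inr ⟨"America", by decide, by decide, by decide⟩
  have b1 : ("Laura" == E1) = false := beq_eq_false_iff_ne.mpr n1.symm
  have b2 : ("Alena" == E1) = false := beq_eq_false_iff_ne.mpr n2.symm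
  have b3 : ("Claudia" == E1) = false := beq_eq_false_iff_ne.mpr n3.symm
  have b4 : ("Queretaro" == E1) = false := beq_eq_false_iff_ne.mpr n4.symm
  have b5 : ("Paris" == E1) = false := beq_eq_false_iff_ne.mpr n5.symm
  have b6 : ("SFrancisco" == E1) = false := beq_eq_false_iff_ne.mpr n6.symm
  have b7 : ("Mexico" == E1) = false := beq_eq_false_iff_ne.mpr n7.symm
  have b8 : ("Francia" == E1) = false := beq_eq_false_iff_ne.mpr n8.symm
  have b9 : ("EUA" == E1) = false := beq_eq_false_iff_ne.mpr n9.symm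
  have hmk : pvSucc = PySem.Dict.mk pvBase := by decide
  refine Or.inl ⟨?_, ?_⟩
  · simp [pvBase, List.filter, b1, b2, b3, b4, b5, b6, b7, b8, b9]
  · rw [hmk]
    simp only [pvBase]
    rw [PySem.Dict.get?_mk_cons, PySem.Dict.get?_mk_cons, PySem.Dict.get?_mk_cons,
      PySem.Dict.get?_mk_cons, PySem.Dict.get?_mk_cons, PySem.Dict.get?_mk_cons,
      PySem.Dict.get?_mk_cons, PySem.Dict.get?_mk_cons, PySem.Dict.get?_mk_cons]
    simp [b1, b2, b3, b4, b5, b6, b7, b8, b9, PySem.Dict.get?]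

lemma esta_empty_E2 (E1 : String) : esta E1 "" = false := by
  rw [esta]; split_ifs with h1 h2
  · rfl
  · rfl
  · exact absurd rfl h2

lemma pvLoop_eq (n : Nat) (E1 E2 : String) (h2 : E2 ≠ "") (hn : pvRank E1 < n) :
    estaLoop E2 n E1 = esta E1 E2 := by
  induction n generalizing E1 with
  | zero => omega
  | succ n ih =>
    rcases eq_or_ne E1 "" with rfl|hE1
    · rw [esta]; simp [estaLoop]
    · rcases pvStep E1 with ⟨hf, hg⟩ | ⟨v, hf, hg, hlt⟩
      · simp only [estaLoop, hg, if_neg hE1]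
        rw [esta, if_neg hE1, if_neg h2]
        split
        · rfl
        · rename_i E A tail heq
          rw [hf] at heq; cases heq
      · rcases eq_or_ne v E2 with rfl|hv
        · simp only [estaLoop, hg, if_neg hE1, beq_self_eq_true, if_true]
          rw [esta, if_neg hE1, if_neg h2]
          split
          · rename_i heq
            rw [hf] at heq; cases heq
          · rename_i E A tail heq
            rw [hf] at heq
            obtain ⟨⟨rfl, rfl⟩, rfl⟩ : (E = E1 ∧ A = v) ∧ tail = [] := by
              simpa using heq.symm
            simp
        · have hb1 : (v == E2) = false := beq_eq_false_iff_ne.mpr hv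
          have hb2 : (E2 == v) = false := beq_eq_false_iff_ne.mpr hv.symm
          simp only [estaLoop, hg, if_neg hE1, hb1, Bool.false_eq_true, if_false]
          rw [esta, if_neg hE1, if_neg h2]
          split
          · rename_i heq
            rw [hf] at heq; cases heq
          · rename_i E A tail heq
            rw [hf] at heq
            obtain ⟨⟨rfl, rfl⟩, rfl⟩ : (E = E1 ∧ A = v) ∧ tail = [] := by
              simpa using heq.symm
            rw [hb2]
            simp only [Bool.false_eq_true, if_false]
            exact ih _ (by omega)

-- ===== VERDICT (by name: the statement is the Claim_ definition above) =====
theorem esta_spec : Claim_equal_esta := by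
  intro E1 E2 _
  show esta E1 E2 = esta_alt E1 E2
  rcases eq_or_ne E2 "" with rfl|h2
  · simp [esta_alt, esta_empty_E2]
  · simp only [esta_alt, if_neg h2]
    exact (pvLoop_eq pvBase.length E1 E2 h2 (by simpa [pvBase] using pvRank_lt_nine E1)).symm
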